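-- pv_equiv track=rewrite | github.com/doocs/leetcode | solution/2400-2499/2457.Minimum Addition to Make Integer Beautiful/Solution.py | makeIntegerBeautiful
-- ===== SOURCE A (Python) =====
-- def makeIntegerBeautiful(n: int, target: int) -> int:
--     def f(x: int) -> int:
--         y = 0
--         while x:
--             y += x % 10
--             x //= 10
--         return y
--
--     x = 0
--     while f(n + x) > target:
--         y = n + x
--         p = 10
--         while y % 10 == 0:
--             y //= 10
--             p *= 10
--         x = (y // 10 + 1) * p - n
--     return x
-- ===== SOURCE B (Python) =====
-- def makeIntegerBeautiful(n: int, target: int) -> int: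
--     def f(x: int) -> int:
--         y = 0
--         while x:
--             y += x % 10
--             x //= 10
--         return y
--
--     p = 1
--     while True:
--         cand = (n + p - 1) // p * p
--         if f(cand) <= target:
--             return cand - n
--         p *= 10
-- ===== Notes on version B (the rewrite author's own statement) =====
-- stated objective: simpler
-- what changed: A's nested loop (strip trailing zeros of n+x, then re-round incrementally) is replaced by one flat loop over p = 10^k that computes each candidate in closed form as (n+p-1)//p*p and returns the first whose digit sum is <= target.
import Mathlib
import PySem

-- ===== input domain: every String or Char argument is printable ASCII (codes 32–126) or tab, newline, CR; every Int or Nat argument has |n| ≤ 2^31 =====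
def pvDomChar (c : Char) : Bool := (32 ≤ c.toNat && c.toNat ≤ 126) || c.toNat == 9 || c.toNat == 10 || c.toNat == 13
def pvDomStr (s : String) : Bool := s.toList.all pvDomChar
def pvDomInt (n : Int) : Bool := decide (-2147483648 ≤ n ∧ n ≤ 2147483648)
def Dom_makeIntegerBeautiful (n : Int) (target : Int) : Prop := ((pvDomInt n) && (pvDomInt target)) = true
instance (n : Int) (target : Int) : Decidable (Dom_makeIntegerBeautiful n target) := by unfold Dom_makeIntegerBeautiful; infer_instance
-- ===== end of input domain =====

-- B replaces A's nested strip-trailing-zeros/re-round update with one flat loop computing each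
-- rounded-up candidate (n+p-1)//p*p in closed form (objective: simpler).


-- ===== PORT A =====
-- helper f (digit sum): 'y = 0; while x: y += x % 10; x //= 10', ported with fuel 64 — ample,
-- since inside Pre_ every value it is applied to is nonnegative and below 10^64
def pvDsumGo : Nat → Int → Int → Int
  | 0, _, y => y
  | fuel + 1, x, y =>
    if x ≠ 0 then pvDsumGo fuel (PySem.Int.floordiv x 10) (y + PySem.Int.mod x 10) else y

def pvDsum (x : Int) : Int := pvDsumGo 64 x 0

-- inner loop of A: 'while y % 10 == 0: y //= 10; p *= 10' (fuel 64: one turn per trailing zero)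
def pvStripGo : Nat → Int → Int → Int × Int
  | 0, y, p => (y, p)
  | fuel + 1, y, p =>
    if PySem.Int.mod y 10 = 0 then pvStripGo fuel (PySem.Int.floordiv y 10) (p * 10) else (y, p)

-- outer loop of A: 'while f(n + x) > target: …' (fuel 64: each turn adds a trailing zero to n+x)
def pvAGo (n target : Int) : Nat → Int → Int
  | 0, x => x
  | fuel + 1, x =>
    if pvDsum (n + x) > target then
      let yp := pvStripGo 64 (n + x) 10
      pvAGo n target fuel ((PySem.Int.floordiv yp.1 10 + 1) * yp.2 - n)
    else x

def makeIntegerBeautiful (n : Int) (target : Int) : Int := pvAGo n target 64 0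

-- ===== PORT B =====
-- B's single loop: 'p = 1; while True: cand = (n+p-1)//p*p; if f(cand) <= target: return cand - n;
-- p *= 10' (fuel 64: inside Pre_ the candidate for p = 10^41 already has digit sum ≤ target)
def pvBGo (n target : Int) : Nat → Int → Int
  | 0, _ => 0
  | fuel + 1, p =>
    let cand := PySem.Int.floordiv (n + p - 1) p * p
    if pvDsum cand ≤ target then cand - n else pvBGo n target fuel (p * 10)

def makeIntegerBeautiful_alt (n : Int) (target : Int) : Int := pvBGo n target 64 1

-- ===== PRECONDITION & SPEC =====
-- Pre_ is exactly the set of inputs on which the Python A terminates: for n < 0 the digit-sum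
-- loop never ends, for n ≥ 1 with target ≤ 0 the outer loop never ends (every digit sum is ≥ 1),
-- and for n = 0 with target < 0 the inner strip loop spins on y = 0 forever; A returns on
-- everything Pre_ admits, so Pre_ excludes no input on which A returns.
def Pre_makeIntegerBeautiful (n : Int) (target : Int) : Prop :=
  (1 ≤ n ∧ 1 ≤ target) ∨ (n = 0 ∧ 0 ≤ target)
instance (n : Int) (target : Int) : Decidable (Pre_makeIntegerBeautiful n target) := by
  unfold Pre_makeIntegerBeautiful; infer_instance

def pvWitness_makeIntegerBeautiful : Int × Int := (45, 2)

def Spec_makeIntegerBeautiful (n : Int) (target : Int) (out : Int) : Prop := out = makeIntegerBeautiful_alt n target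
instance (n : Int) (target : Int) (out : Int) : Decidable (Spec_makeIntegerBeautiful n target out) := by unfold Spec_makeIntegerBeautiful; infer_instance

-- ===== CLAIM (what is proved, stated in full; the proofs are below) =====
def Claim_equal_makeIntegerBeautiful : Prop := ∀ (n : Int) (target : Int), Dom_makeIntegerBeautiful n target → Pre_makeIntegerBeautiful n target → Spec_makeIntegerBeautiful n target (makeIntegerBeautiful n target)

-- ===== LEMMAS AND PROOFS =====

-- 'round v up to the next multiple of p', the quantity B computes for each p
def pvCeil (v p : Int) : Int := PySem.Int.floordiv (v + p - 1) p * p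

-- pvCeil v p is the least multiple of p that is ≥ v (for p > 0)
theorem pvCeil_spec (v p : Int) (hp : 0 < p) :
    v ≤ pvCeil v p ∧ p ∣ pvCeil v p ∧ ∀ m, p ∣ m → v ≤ m → pvCeil v p ≤ m := by
  unfold pvCeil
  rw [PySem.Int.floordiv_eq_ediv_of_pos hp]
  set q := (v + p - 1) / p with hq
  have h1 := Int.ediv_add_emod (v + p - 1) p
  have h2 := Int.emod_nonneg (v + p - 1) hp.ne'
  have h3 := Int.emod_lt_of_pos (v + p - 1) hp
  rw [← hq] at h1
  refine ⟨?_, dvd_mul_left p q, ?_⟩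
  · have hqp : q * p = p * q := mul_comm _ _
    linarith
  · rintro m ⟨t, rfl⟩ hvm
    have hle : q ≤ t := by
      by_contra hlt
      push_neg at hlt
      have h4 : p * t ≤ p * (q - 1) := mul_le_mul_of_nonneg_left (by omega) hp.le
      rw [mul_sub, mul_one] at h4
      linarith
    calc q * p = p * q := mul_comm _ _
      _ ≤ p * t := mul_le_mul_of_nonneg_left hle hp.le

theorem pvCeil_eq_of (v p w : Int) (hp : 0 < p) (hd : p ∣ w) (hle : v ≤ w)
    (hmin : ∀ m, p ∣ m → v ≤ m → w ≤ m) : pvCeil v p = w := by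
  have h := pvCeil_spec v p hp
  exact le_antisymm (h.2.2 w hd hle) (hmin _ h.2.1 h.1)

theorem pvCeil_mono (n : Int) (j k : Nat) (hjk : j ≤ k) :
    pvCeil n ((10:Int)^j) ≤ pvCeil n ((10:Int)^k) := by
  have hj : (0:Int) < 10 ^ j := by positivity
  have hk : (0:Int) < 10 ^ k := by positivity
  have hsj := pvCeil_spec n ((10:Int)^j) hj
  have hsk := pvCeil_spec n ((10:Int)^k) hk
  exact hsj.2.2 _ (dvd_trans (pow_dvd_pow 10 hjk) hsk.2.1) hsk.1

-- characterization of A's strip loop: it factors v = y' * 10^z with y' not a multiple of 10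
theorem pvStripGo_char : ∀ (fuel : Nat) (y p : Int), 0 < y → y < 10 ^ fuel →
    ∃ (z : Nat) (y' : Int), pvStripGo fuel y p = (y', p * 10 ^ z) ∧
      y = y' * 10 ^ z ∧ ¬ ((10:Int) ∣ y') := by
  intro fuel
  induction fuel with
  | zero => intro y p hy hlt; norm_num at hlt; omega
  | succ f ih =>
    intro y p hy hlt
    rw [pvStripGo]
    by_cases h : PySem.Int.mod y 10 = 0
    · rw [if_pos h]
      rw [PySem.Int.mod_eq_emod_of_pos (by norm_num)] at h
      have hdv : (10:Int) ∣ y := Int.dvd_of_emod_eq_zero h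
      rw [PySem.Int.floordiv_eq_ediv_of_pos (by norm_num)]
      have hy2 : 10 * (y / 10) = y := Int.mul_ediv_cancel' hdv
      have hpos2 : 0 < y / 10 := by omega
      have hlt2 : y / 10 < 10 ^ f := by
        rw [pow_succ] at hlt; omega
      obtain ⟨z, y', heq, hfac, hnd⟩ := ih (y / 10) (p * 10) hpos2 hlt2
      refine ⟨z + 1, y', ?_, ?_, hnd⟩
      · rw [heq]; ring_nf
      · rw [pow_succ]; rw [← hy2, hfac]; ring
    · rw [if_neg h]
      rw [PySem.Int.mod_eq_emod_of_pos (by norm_num)] at h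
      refine ⟨0, y, by norm_num, by norm_num, ?_⟩
      intro hd
      exact h (Int.emod_eq_zero_of_dvd hd)

-- A's update from a value y' * 10^z (y' not a multiple of 10) rounds it up past 10^(z+1)
theorem pvStep_eq (y' : Int) (z : Nat) (hy : 0 < y') (hnd : ¬ ((10:Int) ∣ y')) :
    (PySem.Int.floordiv y' 10 + 1) * ((10:Int) ^ (z + 1)) = pvCeil (y' * 10 ^ z) ((10:Int) ^ (z + 1)) := by
  have hP : (0:Int) < 10 ^ z := by positivity
  rw [PySem.Int.floordiv_eq_ediv_of_pos (by norm_num)]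
  set q := y' / 10 with hqdef
  have h1 := Int.ediv_add_emod y' 10
  rw [← hqdef] at h1
  have h2 := Int.emod_nonneg y' (by norm_num : (10:Int) ≠ 0)
  have h3 := Int.emod_lt_of_pos y' (by norm_num : (0:Int) < 10)
  have h4 : y' % 10 ≠ 0 := fun hh => hnd (Int.dvd_of_emod_eq_zero hh)
  set r := y' % 10 with hrdef
  symm
  apply pvCeil_eq_of _ _ _ (by positivity) (dvd_mul_left _ _)
  · rw [pow_succ]
    have : y' ≤ (q + 1) * 10 := by omega
    calc y' * 10 ^ z ≤ ((q + 1) * 10) * 10 ^ z :=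
          mul_le_mul_of_nonneg_right this hP.le
      _ = (q + 1) * (10 ^ z * 10) := by ring
  · rintro m ⟨t, rfl⟩ hvm
    rw [pow_succ] at *
    have ht : q + 1 ≤ t := by
      by_contra hlt
      push_neg at hlt
      have h5 : 10 ^ z * 10 * t ≤ 10 ^ z * 10 * q := by
        apply mul_le_mul_of_nonneg_left (by omega) (by positivity)
      have h6 : y' * 10 ^ z = 10 ^ z * 10 * q + r * 10 ^ z := by rw [← h1]; ring
      have h7 : 0 < r * 10 ^ z := mul_pos (by omega) hP
      linarith
    calc (q + 1) * (10 ^ z * 10) ≤ t * (10 ^ z * 10) :=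
          mul_le_mul_of_nonneg_right ht (by positivity)
      _ = 10 ^ z * 10 * t := by ring

-- B may skip m consecutive candidates whose digit sum is too large
theorem pvBGo_skip (n target : Int) : ∀ (m fuel k : Nat), m ≤ fuel →
    (∀ j, k ≤ j → j < k + m → pvDsum (pvCeil n ((10:Int)^j)) > target) →
    pvBGo n target fuel ((10:Int)^k) = pvBGo n target (fuel - m) ((10:Int)^(k + m)) := by
  intro m
  induction m with
  | zero => intro fuel k _ _; norm_num
  | succ m ih =>
    intro fuel k hm hbad
    obtain ⟨f, rfl⟩ : ∃ f, fuel = f + 1 := ⟨fuel - 1, by omega⟩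
    rw [pvBGo]
    have hk := hbad k le_rfl (by omega)
    rw [show PySem.Int.floordiv (n + 10 ^ k - 1) (10 ^ k) * 10 ^ k = pvCeil n ((10:Int)^k) from rfl]
    rw [if_neg (by omega)]
    rw [show (10:Int) ^ k * 10 = 10 ^ (k + 1) from (pow_succ 10 k).symm]
    rw [ih f (k + 1) (by omega) (fun j h1 h2 => hbad j (by omega) (by omega))]
    congr 1
    · omega
    · congr 1; omega

-- the simulation: from matching states, A's fewer big jumps and B's flat walk agree
theorem pvMain (n target : Int) (hn : 1 ≤ n) (hnD : n ≤ 2147483648) (ht : 1 ≤ target) :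
    ∀ (fb : Nat), ∀ (fa k : Nat), k ≤ 41 → 42 - k ≤ fa → 42 - k ≤ fb →
      pvAGo n target fa (pvCeil n ((10:Int)^k) - n) = pvBGo n target fb ((10:Int)^k) := by
  intro fb
  induction fb using Nat.strong_induction_on with
  | _ fb IH =>
    intro fa k hk41 hfa hfb
    obtain ⟨fa', rfl⟩ : ∃ t, fa = t + 1 := ⟨fa - 1, by omega⟩
    obtain ⟨fb', rfl⟩ : ∃ t, fb = t + 1 := ⟨fb - 1, by omega⟩
    have hp : (0:Int) < 10 ^ k := by positivity
    have hspec := pvCeil_spec n _ hp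
    set v := pvCeil n ((10:Int)^k) with hv
    have hvn : n ≤ v := hspec.1
    have hnx : n + (v - n) = v := by ring
    rw [pvAGo, pvBGo, hnx]
    rw [show PySem.Int.floordiv (n + 10 ^ k - 1) (10 ^ k) * 10 ^ k = v from rfl]
    by_cases hds : pvDsum v ≤ target
    · rw [if_neg (by omega), if_pos hds]
    · rw [if_pos (by omega), if_neg hds]
      have hc41 : pvCeil n ((10:Int)^41) = 10 ^ 41 :=
        pvCeil_eq_of _ _ _ (by positivity) dvd_rfl (by norm_num; omega)
          (fun m hd hm => Int.le_of_dvd (by omega) hd)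
      have hvle : v ≤ 10 ^ 41 := hc41 ▸ pvCeil_mono n k 41 hk41
      have hd41 : pvDsum ((10:Int) ^ 41) = 1 := by decide
      have hvne : v ≠ 10 ^ 41 := fun hh => by rw [hh, hd41] at hds; omega
      have hvlt : v < 10 ^ 41 := lt_of_le_of_ne hvle hvne
      have hvfuel : v < 10 ^ 64 := lt_trans hvlt (by norm_num)
      obtain ⟨z, y', hstrip, hfac, hnd⟩ := pvStripGo_char 64 v 10 (by omega) hvfuel
      have hPz : (0:Int) < 10 ^ z := by positivity
      have hy'pos : 0 < y' := by nlinarith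
      have hzk : k ≤ z := by
        by_contra hh
        push_neg at hh
        have hdv : (10:Int) ^ (z + 1) ∣ y' * 10 ^ z :=
          dvd_trans (pow_dvd_pow 10 (by omega)) (hfac ▸ hspec.2.1)
        rw [pow_succ] at hdv
        obtain ⟨c, hc⟩ := hdv
        refine hnd ⟨c, ?_⟩
        have : y' * 10 ^ z = (10 * c) * 10 ^ z := by rw [hc]; ring
        exact mul_right_cancel₀ hPz.ne' this
      have hz40 : z ≤ 40 := by
        have h10z : (10:Int) ^ z ≤ v := by nlinarith
        by_contra hh
        push_neg at hh
        have : (10:Int) ^ 41 ≤ 10 ^ z := pow_le_pow_right₀ (by norm_num) (by omega)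
        linarith
      -- the value A jumps to is the candidate at exponent z + 1
      have hjump : (PySem.Int.floordiv (pvStripGo 64 v 10).1 10 + 1) * (pvStripGo 64 v 10).2
          = pvCeil n ((10:Int) ^ (z + 1)) := by
        rw [hstrip]
        have h1 : (10:Int) * 10 ^ z = 10 ^ (z + 1) := by rw [pow_succ]; ring
        rw [h1, pvStep_eq y' z hy'pos hnd, ← hfac]
        -- pvCeil v (10^(z+1)) = pvCeil n (10^(z+1))
        have hq : (0:Int) < 10 ^ (z + 1) := by positivity
        have hsz := pvCeil_spec n ((10:Int)^(z+1)) hq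
        refine pvCeil_eq_of _ _ _ hq hsz.2.1 ?_ ?_
        · exact hspec.2.2 _ (dvd_trans (pow_dvd_pow 10 (by omega)) hsz.2.1) hsz.1
        · intro m hd hm
          exact hsz.2.2 m hd (le_trans hvn hm)
      -- B skips the identical candidates at exponents k+1 … z
      have hcj : ∀ j, k + 1 ≤ j → j < k + 1 + (z - k) → pvDsum (pvCeil n ((10:Int)^j)) > target := by
        intro j hj1 hj2
        have hjz : j ≤ z := by omega
        have hdvj : (10:Int) ^ j ∣ v := by
          rw [hfac]
          exact dvd_mul_of_dvd_right (pow_dvd_pow 10 hjz) _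
        have hle1 : pvCeil n ((10:Int)^j) ≤ v := (pvCeil_spec n _ (by positivity)).2.2 v hdvj hvn
        have : pvCeil n ((10:Int)^j) = v := le_antisymm hle1 (pvCeil_mono n k j (by omega))
        rw [this]; omega
      have hskip := pvBGo_skip n target (z - k) fb' (k + 1) (by omega) hcj
      rw [show k + 1 + (z - k) = z + 1 from by omega] at hskip
      show pvAGo n target fa'
          ((PySem.Int.floordiv (pvStripGo 64 v 10).1 10 + 1) * (pvStripGo 64 v 10).2 - n)
        = pvBGo n target fb' (10 ^ k * 10)
      rw [hjump, show (10:Int) ^ k * 10 = 10 ^ (k + 1) from (pow_succ 10 k).symm, hskip]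
      exact IH (fb' - (z - k)) (by omega) fa' (z + 1) (by omega) (by omega) (by omega)

-- ===== VERDICT (by name: the statement is the Claim_ definition above) =====
theorem makeIntegerBeautiful_spec : Claim_equal_makeIntegerBeautiful := by
  intro n target hDom hPre
  unfold Spec_makeIntegerBeautiful makeIntegerBeautiful makeIntegerBeautiful_alt
  rcases hPre with ⟨hn, ht⟩ | ⟨hn, ht⟩
  · have hnD : n ≤ 2147483648 := by
      unfold Dom_makeIntegerBeautiful pvDomInt at hDom
      simp at hDom
      omega
    have h := pvMain n target hn hnD ht 64 64 0 (by norm_num) (by norm_num) (by norm_num)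
    have hc0 : pvCeil n ((10:Int)^0) = n := by
      unfold pvCeil
      rw [PySem.Int.floordiv_eq_ediv_of_pos (by norm_num)]
      norm_num
    rw [hc0] at h
    norm_num at h
    exact h
  · subst hn
    rw [pvAGo, pvBGo]
    have h0 : pvDsum 0 = 0 := by decide
    have hcand : PySem.Int.floordiv (0 + 1 - 1) 1 * 1 = (0:Int) := by decide
    simp only [show ((0:Int) + 0) = 0 from rfl, h0, hcand]
    rw [if_neg (by omega), if_pos ht]
    norm_num
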